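-- pv_equiv track=rewrite | github.com/athosmartins/whatsapp-agent-interface | services/mega_data_set_loader.py | format_property_for_display
-- ===== SOURCE A (Python) =====
-- from typing import List, Dict, Optional
--
-- def format_property_for_display(property_dict: Dict) -> Dict:
--     """
--     Format property data for display in the UI.
--     """
--     formatted = {}
--
--     # Map common field names to display names
--     field_mapping = {
--         'INDICE CADASTRAL': 'indice_cadastral',
--         'ENDERECO': 'endereco',
--         'BAIRRO': 'bairro',
--         'COMPLEMENTO ENDERECO': 'complemento',
--         'TIPO CONSTRUTIVO': 'tipo_construtivo',
--         'ANO CONSTRUCAO': 'ano_construcao',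
--         'AREA CONSTRUCAO': 'area_construcao',
--         'AREA TERRENO': 'area_terreno',
--         'FRACAO IDEAL': 'fracao_ideal'
--     }
--
--     for original_key, display_key in field_mapping.items():
--         # Look for the key in the property dict (case-insensitive)
--         for key in property_dict.keys():
--             if key.upper() == original_key.upper():
--                 formatted[display_key] = property_dict[key]
--                 break
--
--     return formatted
-- ===== SOURCE B (Python) =====
-- def format_property_for_display(property_dict):
--     """
--     Format property data for display in the UI.
--     """
--     field_mapping = {
--         'INDICE CADASTRAL': 'indice_cadastral',
--         'ENDERECO': 'endereco',
--         'BAIRRO': 'bairro',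
--         'COMPLEMENTO ENDERECO': 'complemento',
--         'TIPO CONSTRUTIVO': 'tipo_construtivo',
--         'ANO CONSTRUCAO': 'ano_construcao',
--         'AREA CONSTRUCAO': 'area_construcao',
--         'AREA TERRENO': 'area_terreno',
--         'FRACAO IDEAL': 'fracao_ideal',
--     }
--     wanted = {k.upper(): v for k, v in field_mapping.items()}
--
--     # Single pass over the DATA, back to front, overwriting: after the pass each
--     # wanted uppercase key holds the value of its FIRST matching property key.
--     found = {}
--     for key, value in reversed(list(property_dict.items())):
--         up = key.upper()
--         if up in wanted:
--             found[up] = value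
--
--     return {display: found[up] for up, display in wanted.items() if up in found}
-- ===== Notes on version B (the rewrite author's own statement) =====
-- stated objective: faster
-- what changed: Inverts the iteration: instead of scanning all property keys once per mapping entry, B makes a single reverse pass over the property items, overwriting found[key.upper()] so the first occurrence wins, then emits the results in mapping order.
import Mathlib
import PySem

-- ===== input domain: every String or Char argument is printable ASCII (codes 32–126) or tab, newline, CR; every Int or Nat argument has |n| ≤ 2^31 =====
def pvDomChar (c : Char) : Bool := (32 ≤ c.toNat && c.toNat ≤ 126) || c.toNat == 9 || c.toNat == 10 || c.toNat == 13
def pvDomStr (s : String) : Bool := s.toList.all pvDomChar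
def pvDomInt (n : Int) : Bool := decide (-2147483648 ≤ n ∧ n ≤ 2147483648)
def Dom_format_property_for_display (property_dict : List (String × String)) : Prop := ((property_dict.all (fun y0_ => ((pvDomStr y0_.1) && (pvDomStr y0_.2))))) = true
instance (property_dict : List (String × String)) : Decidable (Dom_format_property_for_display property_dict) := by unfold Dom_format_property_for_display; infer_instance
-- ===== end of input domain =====

-- B inverts the iteration: one reverse pass over the property items (overwrite so the first
-- occurrence wins) instead of one scan of all keys per mapping entry (objective: faster, constant factor).

-- ===== PORT A =====
-- the field_mapping dict literal, as its items() list
def pvFieldMapping : List (String × String) :=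
  [("INDICE CADASTRAL", "indice_cadastral"),
   ("ENDERECO", "endereco"),
   ("BAIRRO", "bairro"),
   ("COMPLEMENTO ENDERECO", "complemento"),
   ("TIPO CONSTRUTIVO", "tipo_construtivo"),
   ("ANO CONSTRUCAO", "ano_construcao"),
   ("AREA CONSTRUCAO", "area_construcao"),
   ("AREA TERRENO", "area_terreno"),
   ("FRACAO IDEAL", "fracao_ideal")]

-- A's inner 'for key in property_dict.keys(): if key.upper() == original_key.upper(): … break'
def pvFindKey (ks : List String) (orig : String) : Option String :=
  match ks with
  | [] => none
  | k :: rest =>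
    if PySem.Str.upper k == PySem.Str.upper orig then some k else pvFindKey rest orig

def format_property_for_display (property_dict : List (String × String)) : List (String × String) :=
  let d : PySem.Dict String String := PySem.Dict.ofList property_dict
  let formatted : PySem.Dict String String :=
    pvFieldMapping.foldl (fun formatted p =>
      match pvFindKey d.keys p.1 with
      | some k =>
        match d.get? k with          -- property_dict[key]; the key was found among d.keys, so present
        | some v => formatted.insert p.2 v
        | none => formatted
      | none => formatted) PySem.Dict.empty
  formatted.items

-- ===== PORT B =====
-- wanted = {k.upper(): v for k, v in field_mapping.items()}
def pvWanted : PySem.Dict String String :=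
  pvFieldMapping.foldl (fun w p => w.insert (PySem.Str.upper p.1) p.2) PySem.Dict.empty

def format_property_for_display_alt (property_dict : List (String × String)) : List (String × String) :=
  let d : PySem.Dict String String := PySem.Dict.ofList property_dict
  -- for key, value in reversed(list(property_dict.items())): … found[up] = value
  let found : PySem.Dict String String :=
    (d.items.reverse).foldl (fun found kv =>
      if pvWanted.contains (PySem.Str.upper kv.1) then
        found.insert (PySem.Str.upper kv.1) kv.2
      else found) PySem.Dict.empty
  -- {display: found[up] for up, display in wanted.items() if up in found}
  let formatted : PySem.Dict String String :=
    pvWanted.items.foldl (fun out p =>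
      match found.get? p.1 with
      | some v => out.insert p.2 v
      | none => out) PySem.Dict.empty
  formatted.items

-- ===== PRECONDITION & SPEC =====
def Spec_format_property_for_display (property_dict : List (String × String)) (out : List (String × String)) : Prop := out = format_property_for_display_alt property_dict
instance (property_dict : List (String × String)) (out : List (String × String)) : Decidable (Spec_format_property_for_display property_dict out) := by unfold Spec_format_property_for_display; infer_instance

-- ===== CLAIM (what is proved, stated in full; the proofs are below) =====
def Claim_equal_format_property_for_display : Prop := ∀ (property_dict : List (String × String)), Dom_format_property_for_display property_dict → Spec_format_property_for_display property_dict (format_property_for_display property_dict)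

-- ===== LEMMAS AND PROOFS =====

-- the value paired with the first key of pl whose upper() is u (the common characterisation)
def pvFindVal (pl : List (String × String)) (u : String) : Option String :=
  match pl with
  | [] => none
  | kv :: rest => if PySem.Str.upper kv.1 = u then some kv.2 else pvFindVal rest u

theorem pvFindKey_mem (ks : List String) (orig k : String)
    (h : pvFindKey ks orig = some k) : k ∈ ks := by
  induction ks with
  | nil => simp [pvFindKey] at h
  | cons a rest ih =>
    simp only [pvFindKey] at h
    split at h
    · cases h; exact List.mem_cons_self
    · exact List.mem_cons_of_mem _ (ih h)

-- A's inner scan followed by the dict lookup computes pvFindVal on the items list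
theorem pvA_side (pl : List (String × String)) (hnd : (pl.map Prod.fst).Nodup) (orig : String) :
    (match pvFindKey (pl.map Prod.fst) orig with
     | some k => (PySem.Dict.mk pl).get? k
     | none => none) = pvFindVal pl (PySem.Str.upper orig) := by
  induction pl with
  | nil => simp [pvFindKey, pvFindVal]
  | cons kv rest ih =>
    obtain ⟨k1, v1⟩ := kv
    simp only [List.map_cons, List.nodup_cons] at hnd
    simp only [List.map_cons, pvFindKey, pvFindVal]
    by_cases he : PySem.Str.upper k1 = PySem.Str.upper orig
    · rw [show (PySem.Str.upper k1 == PySem.Str.upper orig) = true from by simp [he]]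
      simp [he, PySem.Dict.get?_mk_cons]
    · rw [show (PySem.Str.upper k1 == PySem.Str.upper orig) = false from by simp [he]]
      simp only [Bool.false_eq_true, if_false, if_neg he]
      rw [← ih hnd.2]
      rcases hf : pvFindKey (rest.map Prod.fst) orig with _ | k
      · simp
      · have hk : k ∈ rest.map Prod.fst := pvFindKey_mem _ _ _ hf
        have hne : (k1 == k) = false := by
          simp only [beq_eq_false_iff_ne, ne_eq]
          intro hkk; exact hnd.1 (hkk ▸ hk)
        simp [PySem.Dict.get?_mk_cons, hne]

-- B's reverse-overwrite pass answers lookups by pvFindVal (first occurrence wins), filtered by wanted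
theorem pvFound_get (pl : List (String × String)) (u : String) :
    ((pl.reverse).foldl (fun found kv =>
        if pvWanted.contains (PySem.Str.upper kv.1) then
          found.insert (PySem.Str.upper kv.1) kv.2
        else found) PySem.Dict.empty).get? u
    = if pvWanted.contains u then pvFindVal pl u else none := by
  rw [List.foldl_reverse]
  induction pl with
  | nil => simp [pvFindVal, PySem.Dict.get?_empty]
  | cons kv rest ih =>
    simp only [List.foldr_cons, pvFindVal]
    by_cases hc : pvWanted.contains (PySem.Str.upper kv.1) = true
    · rw [if_pos hc, PySem.Dict.get?_insert, ih]
      by_cases he : u = PySem.Str.upper kv.1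
      · subst he; simp [hc]
      · have he' : ¬ PySem.Str.upper kv.1 = u := fun h => he h.symm
        simp [he, he']
    · simp only [Bool.not_eq_true] at hc
      rw [if_neg (by simp [hc]), ih]
      by_cases he : PySem.Str.upper kv.1 = u
      · rw [← he, hc]
        simp
      · rw [if_neg he]

-- the 9 mapping keys are already uppercase and all present in wanted; wanted.items() is field_mapping
theorem pvMapping_keys : ∀ p ∈ pvFieldMapping,
    PySem.Str.upper p.1 = p.1 ∧ pvWanted.contains p.1 = true := by decide

theorem pvWanted_items : pvWanted.items = pvFieldMapping := by decide

-- ===== VERDICT (by name: the statement is the Claim_ definition above) =====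
theorem format_property_for_display_spec : Claim_equal_format_property_for_display := by
  intro property_dict _
  unfold Spec_format_property_for_display
  unfold format_property_for_display format_property_for_display_alt
  dsimp only
  rw [pvWanted_items]
  refine congrArg PySem.Dict.items ?_
  apply PySem.List.foldl_congr_mem
  intro formatted p hp
  obtain ⟨hup, hcont⟩ := pvMapping_keys p hp
  rw [pvFound_get, if_pos hcont]
  set d := PySem.Dict.ofList property_dict with hd
  have hnd : (d.items.map Prod.fst).Nodup := by
    have := PySem.Dict.nodup_keys_ofList (κ := String) (ν := String) property_dict
    simpa [PySem.Dict.keys] using this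
  have hA := pvA_side d.items hnd p.1
  have hdk : d.keys = d.items.map Prod.fst := by simp [PySem.Dict.keys]
  have hmk : PySem.Dict.mk d.items = d := rfl
  rw [hmk, hup] at hA
  rw [hdk.symm] at hA
  rw [← hA]
  rcases pvFindKey d.keys p.1 with _ | k <;> simp
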